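-- pv_equiv track=rewrite | github.com/orospakr/peephole | peephole/drivers/picolcd/vu_meter.py | generateBar
-- ===== SOURCE A (Python) =====
-- def generateBar(num):
--     '''Generate a bar with a given height in PicoLCD character format.
--
--     num -- the number of rows that should be darkened, starting from the
--            bottom.
--
--     Should be factored out somewhere.'''
--     bar = ''
--     for row in range(0,8):
--         # I subtract one because this the row addressing is zero-based
--         if row <= (num - 1):
--             bar += '\x00'
--         else:
--             bar += '\x1F'
--     return bar
-- ===== SOURCE B (Python) =====
-- def generateBar(num):
--     '''Generate a bar with a given height in PicoLCD character format.'''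
--     n = max(0, min(8, num))
--     return '\x00' * n + '\x1f' * (8 - n)
-- ===== Notes on version B (the rewrite author's own statement) =====
-- stated objective: simpler
-- what changed: Replaces the 8-iteration per-row loop with a closed-form clamp n = max(0, min(8, num)) and two string multiplications '\x00'*n + '\x1f'*(8-n).
import Mathlib
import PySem

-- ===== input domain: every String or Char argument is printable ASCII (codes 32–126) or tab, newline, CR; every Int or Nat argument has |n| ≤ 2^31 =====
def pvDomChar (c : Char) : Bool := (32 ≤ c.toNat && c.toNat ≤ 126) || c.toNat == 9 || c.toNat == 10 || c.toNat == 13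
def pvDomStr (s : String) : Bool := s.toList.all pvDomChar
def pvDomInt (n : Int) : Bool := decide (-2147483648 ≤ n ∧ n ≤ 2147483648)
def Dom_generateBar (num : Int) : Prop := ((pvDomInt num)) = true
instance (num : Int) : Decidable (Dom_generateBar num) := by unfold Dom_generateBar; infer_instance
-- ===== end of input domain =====

-- B replaces A's 8-iteration per-row loop by a closed-form clamp and two replications (simpler).

-- ===== PORT A =====
-- string accumulation is modelled on List Char (String.ofList at the end), exact for these 1-char appends
def generateBar (num : Int) : String :=
  let bar := (PySem.List.pyRange 0 8 1).foldl
    (fun bar row => bar ++ (if row ≤ num - 1 then ['\x00'] else ['\x1F'])) ([] : List Char)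
  String.ofList bar

-- ===== PORT B =====
def generateBar_alt (num : Int) : String :=
  let n := (max 0 (min 8 num)).toNat
  String.ofList (List.replicate n '\x00' ++ List.replicate (8 - n) '\x1F')

-- ===== PRECONDITION & SPEC =====
def Spec_generateBar (num : Int) (out : String) : Prop := out = generateBar_alt num
instance (num : Int) (out : String) : Decidable (Spec_generateBar num out) := by unfold Spec_generateBar; infer_instance

-- ===== CLAIM (what is proved, stated in full; the proofs are below) =====
def Claim_equal_generateBar : Prop := ∀ (num : Int), Dom_generateBar num → Spec_generateBar num (generateBar num)

-- ===== LEMMAS AND PROOFS =====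

-- A's per-row conditions only see num through the clamped value c = max 0 (min 8 num)
theorem generateBar_clamp (num : Int) :
    generateBar num = generateBar (max 0 (min 8 num)) := by
  have e0 : ((0:Int) ≤ num - 1) = ((0:Int) ≤ max 0 (min 8 num) - 1) := by
    simp only [eq_iff_iff]; omega
  have e1 : ((1:Int) ≤ num - 1) = ((1:Int) ≤ max 0 (min 8 num) - 1) := by
    simp only [eq_iff_iff]; omega
  have e2 : ((2:Int) ≤ num - 1) = ((2:Int) ≤ max 0 (min 8 num) - 1) := by
    simp only [eq_iff_iff]; omega
  have e3 : ((3:Int) ≤ num - 1) = ((3:Int) ≤ max 0 (min 8 num) - 1) := by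
    simp only [eq_iff_iff]; omega
  have e4 : ((4:Int) ≤ num - 1) = ((4:Int) ≤ max 0 (min 8 num) - 1) := by
    simp only [eq_iff_iff]; omega
  have e5 : ((5:Int) ≤ num - 1) = ((5:Int) ≤ max 0 (min 8 num) - 1) := by
    simp only [eq_iff_iff]; omega
  have e6 : ((6:Int) ≤ num - 1) = ((6:Int) ≤ max 0 (min 8 num) - 1) := by
    simp only [eq_iff_iff]; omega
  have e7 : ((7:Int) ≤ num - 1) = ((7:Int) ≤ max 0 (min 8 num) - 1) := by
    simp only [eq_iff_iff]; omega
  simp only [generateBar,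
    show PySem.List.pyRange 0 8 1 = [0,1,2,3,4,5,6,7] from by decide,
    List.foldl]
  simp only [e0, e1, e2, e3, e4, e5, e6, e7]

-- ===== VERDICT (by name: the statement is the Claim_ definition above) =====
theorem generateBar_spec : Claim_equal_generateBar := by
  intro num _
  unfold Spec_generateBar
  rw [generateBar_clamp]
  have halt : generateBar_alt num = generateBar_alt (max 0 (min 8 num)) := by
    unfold generateBar_alt
    have : max 0 (min 8 (max 0 (min 8 num))) = max 0 (min 8 num) := by omega
    rw [this]
  rw [halt]
  set c := max 0 (min 8 num) with hc
  have h0 : 0 ≤ c := by omega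
  have h8 : c ≤ 8 := by omega
  clear hc
  interval_cases c <;> decide
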